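-- pv_equiv track=rewrite | github.com/Madennel/pythonProject1 | module_2_hard.py | generate_password
-- ===== SOURCE A (Python) =====
-- def generate_password(n):
--     password = ""
--
--     # Генерируем уникальные пары чисел от 1 до 20
--     for i in range(1, n):
--         for j in range(i + 1, n + 1):
--             pair_sum = i + j
--
--             # Проверяем кратность
--             if n % pair_sum == 0:
--                 # Формируем строку из чисел пары
--                 password += f"{i}{j}"
--
--     return password
-- ===== SOURCE B (Python) =====
-- def generate_password(n):
--     # Precompute the (sorted) divisors of n once; for each i the valid pairs
--     # (i, j) correspond exactly to divisors d = i + j with d > 2*i (then j = d - i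
--     # lies in [i+1, n], since every positive divisor of n is <= n).
--     divisors = [d for d in range(1, n + 1) if n % d == 0]
--     parts = []
--     for i in range(1, n):
--         for d in divisors:
--             if d > 2 * i:
--                 parts.append(f"{i}{d - i}")
--     return "".join(parts)
-- ===== Notes on version B (the rewrite author's own statement) =====
-- stated objective: faster
-- what changed: B precomputes the sorted divisor list of n once and, for each i, emits a pair for every divisor d > 2*i (j = d - i), replacing A's O(n) inner scan over all j with a scan over the d(n) divisors, and builds the result with a list + join instead of quadratic string concatenation.
import Mathlib
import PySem

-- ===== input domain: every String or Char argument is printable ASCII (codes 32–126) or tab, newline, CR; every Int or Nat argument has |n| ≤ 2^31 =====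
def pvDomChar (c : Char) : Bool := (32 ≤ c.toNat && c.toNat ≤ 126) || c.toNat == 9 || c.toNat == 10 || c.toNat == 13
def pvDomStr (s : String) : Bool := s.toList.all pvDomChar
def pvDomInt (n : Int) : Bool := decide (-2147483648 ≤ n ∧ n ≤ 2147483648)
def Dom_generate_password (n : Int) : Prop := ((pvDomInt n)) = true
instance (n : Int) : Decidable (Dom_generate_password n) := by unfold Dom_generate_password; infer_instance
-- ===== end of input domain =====

-- B precomputes the (sorted) divisor list of n once and, per i, emits a pair for each
-- divisor d > 2*i (j = d - i), instead of A's full inner scan over j: a faster algorithm.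

-- ===== PORT A =====
def generate_password (n : Int) : String :=
  (PySem.List.pyRange 1 n 1).foldl (fun password i =>
    (PySem.List.pyRange (i + 1) (n + 1) 1).foldl (fun password j =>
      let pair_sum := i + j
      if PySem.Int.mod n pair_sum = 0 then
        password ++ (PySem.Int.toStr i ++ PySem.Int.toStr j)
      else password) password) ""

-- ===== PORT B =====
def generate_password_alt (n : Int) : String :=
  let divisors := (PySem.List.pyRange 1 (n + 1) 1).filter (fun d => PySem.Int.mod n d = 0)
  let parts := (PySem.List.pyRange 1 n 1).foldl (fun parts i =>
    divisors.foldl (fun parts d =>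
      if d > 2 * i then parts ++ [PySem.Int.toStr i ++ PySem.Int.toStr (d - i)]
      else parts) parts) ([] : List String)
  String.join parts

-- ===== PRECONDITION & SPEC =====
def Spec_generate_password (n : Int) (out : String) : Prop := out = generate_password_alt n
instance (n : Int) (out : String) : Decidable (Spec_generate_password n out) := by unfold Spec_generate_password; infer_instance

-- ===== CLAIM (what is proved, stated in full; the proofs are below) =====
def Claim_equal_generate_password : Prop := ∀ (n : Int), Dom_generate_password n → Spec_generate_password n (generate_password n)

-- ===== LEMMAS AND PROOFS =====

theorem str_foldl_concat : ∀ (l : List String) (a : String), l.foldl (· ++ ·) a = a ++ String.join l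
  | [], a => by simp [String.join]
  | s :: l, a => by
    have h := str_foldl_concat l
    have h2 : String.join (s :: l) = l.foldl (· ++ ·) ("" ++ s) := rfl
    rw [List.foldl_cons, h, h2, String.empty_append, h, String.append_assoc]

theorem str_join_cons (s : String) (l : List String) :
    String.join (s :: l) = s ++ String.join l := by
  have h2 : String.join (s :: l) = l.foldl (· ++ ·) ("" ++ s) := rfl
  rw [h2, String.empty_append, str_foldl_concat]

theorem str_join_append (l m : List String) :
    String.join (l ++ m) = String.join l ++ String.join m := by
  induction l with
  | nil => simp [String.join]
  | cons s l ih =>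
    rw [List.cons_append, str_join_cons, str_join_cons, ih, String.append_assoc]

theorem str_foldl_append_if (p : Int → Prop) [DecidablePred p] (g : Int → String) :
    ∀ (l : List Int) (s : String),
      l.foldl (fun s x => if p x then s ++ g x else s) s
        = s ++ String.join ((l.filter (fun x => decide (p x))).map g)
  | [], s => by simp [String.join]
  | x :: l, s => by
    by_cases h : p x
    · rw [List.foldl_cons, if_pos h, str_foldl_append_if p g l,
        List.filter_cons_of_pos (by simpa using h), List.map_cons, str_join_cons,
        String.append_assoc]
    · rw [List.foldl_cons, if_neg h, str_foldl_append_if p g l,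
        List.filter_cons_of_neg (by simpa using h)]

theorem str_foldl_append (g : Int → String) :
    ∀ (l : List Int) (s : String),
      l.foldl (fun s x => s ++ g x) s = s ++ String.join (l.map g)
  | [], s => by simp [String.join]
  | x :: l, s => by
    rw [List.foldl_cons, str_foldl_append g l, List.map_cons, str_join_cons,
      String.append_assoc]

theorem str_join_flatMap (g : Int → List String) (l : List Int) :
    String.join (l.flatMap g) = String.join (l.map (fun i => String.join (g i))) := by
  induction l with
  | nil => rfl
  | cons x l ih => rw [List.flatMap_cons, str_join_append, ih, List.map_cons, str_join_cons]

-- key range lemma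
theorem map_add_pyRange (i n : Int) :
    (PySem.List.pyRange (i + 1) (n + 1) 1).map (fun j => i + j)
      = PySem.List.pyRange (2 * i + 1) (n + i + 1) 1 := by
  rw [PySem.List.pyRange_one, PySem.List.pyRange_one, List.map_map]
  have he : (n + 1 - (i + 1)).toNat = (n + i + 1 - (2 * i + 1)).toNat := by omega
  rw [he]
  exact List.map_congr_left (fun k _ => by simp only [Function.comp_apply]; omega)

theorem filter_range_eq (n i : Int) (h1 : 1 ≤ i) (h2 : i < n) (p : Int → Bool)
    (hlow : ∀ d, 1 ≤ d → d < 2 * i + 1 → p d = false)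
    (hhigh : ∀ d, n + 1 ≤ d → d < n + i + 1 → p d = false) :
    (PySem.List.pyRange 1 (n + 1) 1).filter p
      = (PySem.List.pyRange (2 * i + 1) (n + i + 1) 1).filter p := by
  have hs1 : PySem.List.pyRange 1 (n + i + 1) 1
      = PySem.List.pyRange 1 (n + 1) 1 ++ PySem.List.pyRange (n + 1) (n + i + 1) 1 :=
    PySem.List.pyRange_one_append _ _ _ (by omega) (by omega)
  have hs2 : PySem.List.pyRange 1 (n + i + 1) 1
      = PySem.List.pyRange 1 (2 * i + 1) 1 ++ PySem.List.pyRange (2 * i + 1) (n + i + 1) 1 :=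
    PySem.List.pyRange_one_append _ _ _ (by omega) (by omega)
  have e1 : (PySem.List.pyRange (n + 1) (n + i + 1) 1).filter p = [] := by
    apply List.filter_eq_nil_iff.mpr
    intro d hd
    rw [PySem.List.mem_pyRange_one] at hd
    simp [hhigh d hd.1 hd.2]
  have e2 : (PySem.List.pyRange 1 (2 * i + 1) 1).filter p = [] := by
    apply List.filter_eq_nil_iff.mpr
    intro d hd
    rw [PySem.List.mem_pyRange_one] at hd
    simp [hlow d hd.1 hd.2]
  have := congrArg (List.filter p) (hs1.symm.trans hs2)
  rwa [List.filter_append, List.filter_append, e1, e2, List.append_nil, List.nil_append] at this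

theorem inner_eq (n i : Int) (h1 : 1 ≤ i) (h2 : i < n) :
    (((PySem.List.pyRange 1 (n + 1) 1).filter (fun d => PySem.Int.mod n d = 0)).filter
        (fun d => decide (d > 2 * i))).map
      (fun d => PySem.Int.toStr i ++ PySem.Int.toStr (d - i))
    = ((PySem.List.pyRange (i + 1) (n + 1) 1).filter
        (fun j => PySem.Int.mod n (i + j) = 0)).map
      (fun j => PySem.Int.toStr i ++ PySem.Int.toStr j) := by
  have hq : ((PySem.List.pyRange (i + 1) (n + 1) 1).filter
        (fun j => PySem.Int.mod n (i + j) = 0))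
      = ((PySem.List.pyRange (i + 1) (n + 1) 1).filter
        (fun j => ((fun d => decide (d > 2 * i) && decide (PySem.Int.mod n d = 0)) (i + j)))) := by
    apply List.filter_congr
    intro j hj
    rw [PySem.List.mem_pyRange_one] at hj
    have : (decide (i + j > 2 * i)) = true := by simp; omega
    simp [this]
  have hmapf : ((PySem.List.pyRange (i + 1) (n + 1) 1).filter
        (fun j => PySem.Int.mod n (i + j) = 0)).map
      (fun j => PySem.Int.toStr i ++ PySem.Int.toStr j)
    = (((PySem.List.pyRange (i + 1) (n + 1) 1).filter
        (fun j => PySem.Int.mod n (i + j) = 0)).map (fun j => i + j)).map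
      (fun d => PySem.Int.toStr i ++ PySem.Int.toStr (d - i)) := by
    rw [List.map_map]
    apply List.map_congr_left
    intro j _
    simp only [Function.comp_apply]
    congr 1
    congr 1
    omega
  have hc : (List.filter (fun j => (fun d => decide (d > 2 * i) && decide (PySem.Int.mod n d = 0)) (i + j)) (PySem.List.pyRange (i + 1) (n + 1) 1))
      = (List.filter ((fun d => decide (d > 2 * i) && decide (PySem.Int.mod n d = 0)) ∘ (fun j => i + j)) (PySem.List.pyRange (i + 1) (n + 1) 1)) := rfl
  rw [hmapf, hq, hc, ← List.filter_map, map_add_pyRange, List.filter_filter]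
  congr 1
  apply filter_range_eq n i h1 h2
  · intro d _ hd
    have : (decide (d > 2 * i)) = false := by simp; omega
    simp [this]
  · intro d hd _
    have hn : (0:Int) < n := by omega
    have : ¬ (PySem.Int.mod n d = 0) := by
      rw [PySem.Int.mod_eq_zero_iff_dvd]
      intro hdvd
      have := Int.le_of_dvd hn hdvd
      omega
    simp [this]

theorem main_eq (n : Int) : generate_password n = generate_password_alt n := by
  have hA : generate_password n
      = String.join ((PySem.List.pyRange 1 n 1).map (fun i =>
          String.join (((PySem.List.pyRange (i + 1) (n + 1) 1).filter
              (fun j => PySem.Int.mod n (i + j) = 0)).map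
            (fun j => PySem.Int.toStr i ++ PySem.Int.toStr j)))) := by
    simp only [generate_password]
    rw [show (fun (password : String) (i : Int) =>
          (PySem.List.pyRange (i + 1) (n + 1) 1).foldl (fun password j =>
            if PySem.Int.mod n (i + j) = 0 then
              password ++ (PySem.Int.toStr i ++ PySem.Int.toStr j)
            else password) password)
        = (fun (password : String) (i : Int) => password ++
            String.join (((PySem.List.pyRange (i + 1) (n + 1) 1).filter
              (fun j => decide (PySem.Int.mod n (i + j) = 0))).map
            (fun j => PySem.Int.toStr i ++ PySem.Int.toStr j))) from
      funext fun s => funext fun i =>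
        str_foldl_append_if (fun j => PySem.Int.mod n (i + j) = 0) _ _ s]
    rw [str_foldl_append, String.empty_append]
  have hB : generate_password_alt n
      = String.join ((PySem.List.pyRange 1 n 1).flatMap (fun i =>
          (((PySem.List.pyRange 1 (n + 1) 1).filter (fun d => PySem.Int.mod n d = 0)).filter
              (fun d => decide (d > 2 * i))).map
            (fun d => PySem.Int.toStr i ++ PySem.Int.toStr (d - i)))) := by
    simp only [generate_password_alt]
    rw [show (fun (parts : List String) (i : Int) =>
          (((PySem.List.pyRange 1 (n + 1) 1).filter (fun d => PySem.Int.mod n d = 0)).foldl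
            (fun parts d =>
              if d > 2 * i then parts ++ [PySem.Int.toStr i ++ PySem.Int.toStr (d - i)]
              else parts) parts))
        = (fun (parts : List String) (i : Int) => parts ++
            (((PySem.List.pyRange 1 (n + 1) 1).filter (fun d => PySem.Int.mod n d = 0)).filter
              (fun d => decide (d > 2 * i))).map
            (fun d => PySem.Int.toStr i ++ PySem.Int.toStr (d - i))) from
      funext fun a => funext fun i =>
        PySem.List.foldl_append_ite (fun d => d > 2 * i) _ _ _]
    rw [PySem.List.foldl_append_eq_flatMap, List.nil_append]
  rw [hA, hB, str_join_flatMap]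
  congr 1
  apply List.map_congr_left
  intro i hi
  rw [PySem.List.mem_pyRange_one] at hi
  rw [inner_eq n i hi.1 hi.2]


-- ===== VERDICT (by name: the statement is the Claim_ definition above) =====
theorem generate_password_spec : Claim_equal_generate_password := by
  intro n _
  unfold Spec_generate_password
  exact main_eq n
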